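-- pv_equiv track=rewrite | github.com/maruyamakoju/autonas-codelm | test_phase2_features.py | check_loop_detection
-- ===== SOURCE A (Python) =====
-- from collections import deque
--
-- def check_loop_detection(state_history: deque, max_repetitions: int = 5) -> tuple[bool, int]:
--     """エラーループを検知。"""
--     if len(state_history) < max_repetitions:
--         return False, 0
--
--     latest_state, latest_hash, latest_action = state_history[-1]
--     repetition_count = 0
--     for state, screen_hash, action_summary in reversed(state_history):
--         if state == latest_state and screen_hash == latest_hash and action_summary == latest_action:
--             repetition_count += 1
--         else:
--             break
--
--     is_loop = repetition_count >= max_repetitions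
--     return is_loop, repetition_count
-- ===== SOURCE B (Python) =====
-- def check_loop_detection(state_history, max_repetitions=5):
--     """Forward pass with a reset-on-mismatch run counter instead of a reversed scan with break."""
--     if len(state_history) < max_repetitions:
--         return False, 0
--     latest_state, latest_hash, latest_action = state_history[-1]
--     run = 0
--     for state, screen_hash, action_summary in state_history:
--         if state == latest_state and screen_hash == latest_hash and action_summary == latest_action:
--             run += 1
--         else:
--             run = 0
--     return run >= max_repetitions, run
-- ===== Notes on version B (the rewrite author's own statement) =====
-- stated objective: alternative
-- what changed: Replaces the reversed iteration with early break by a single forward pass maintaining a run counter that is reset to 0 on mismatch; the trailing run after the loop equals A's count.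
import Mathlib
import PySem

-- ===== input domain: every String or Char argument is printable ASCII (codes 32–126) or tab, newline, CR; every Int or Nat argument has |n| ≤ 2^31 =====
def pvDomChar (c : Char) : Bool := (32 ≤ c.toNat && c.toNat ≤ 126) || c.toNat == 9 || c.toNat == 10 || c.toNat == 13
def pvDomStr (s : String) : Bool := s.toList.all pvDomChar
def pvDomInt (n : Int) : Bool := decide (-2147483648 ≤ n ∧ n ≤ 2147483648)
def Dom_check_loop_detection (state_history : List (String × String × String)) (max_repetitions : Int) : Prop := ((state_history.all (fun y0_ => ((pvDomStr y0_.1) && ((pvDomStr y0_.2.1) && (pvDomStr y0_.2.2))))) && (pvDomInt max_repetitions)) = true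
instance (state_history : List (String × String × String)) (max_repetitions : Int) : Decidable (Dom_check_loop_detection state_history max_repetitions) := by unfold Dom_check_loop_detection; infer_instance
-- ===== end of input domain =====

-- B replaces A's reversed scan with break by a forward pass with a reset-on-mismatch run counter (alternative decomposition, same cost).

-- ===== PORT A =====
-- the 'for … in reversed(state_history): … else: break' loop, counting while fields match
def clCountA (latest : String × String × String) : List (String × String × String) → Int
  | [] => 0
  | x :: rest =>
    if x.1 == latest.1 && x.2.1 == latest.2.1 && x.2.2 == latest.2.2 then
      1 + clCountA latest rest
    else 0

def check_loop_detection (state_history : List (String × String × String)) (max_repetitions : Int) : Bool × Int :=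
  if (state_history.length : Int) < max_repetitions then (false, 0)
  else
    match PySem.List.pyGet? state_history (-1) with   -- state_history[-1]; none = IndexError, excluded by Pre_
    | none => (false, 0)
    | some latest =>
      let repetition_count := clCountA latest state_history.reverse
      (decide (max_repetitions ≤ repetition_count), repetition_count)

-- ===== PORT B =====
def check_loop_detection_alt (state_history : List (String × String × String)) (max_repetitions : Int) : Bool × Int :=
  if (state_history.length : Int) < max_repetitions then (false, 0)
  else
    match PySem.List.pyGet? state_history (-1) with   -- state_history[-1]; none = IndexError, excluded by Pre_
    | none => (false, 0)
    | some latest =>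
      let run := state_history.foldl
        (fun run x =>
          if x.1 == latest.1 && x.2.1 == latest.2.1 && x.2.2 == latest.2.2 then run + 1 else 0) 0
      (decide (max_repetitions ≤ run), run)

-- ===== PRECONDITION & SPEC =====
-- Pre_ excludes only the inputs where both Pythons raise IndexError: an empty history with max_repetitions ≤ 0.
def Pre_check_loop_detection (state_history : List (String × String × String)) (max_repetitions : Int) : Prop :=
  state_history = [] → 0 < max_repetitions
instance (state_history : List (String × String × String)) (max_repetitions : Int) : Decidable (Pre_check_loop_detection state_history max_repetitions) := by unfold Pre_check_loop_detection; infer_instance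
def pvWitness_check_loop_detection : (List (String × String × String)) × Int := ([("a", "h", "x"), ("a", "h", "x")], 2)

def Spec_check_loop_detection (state_history : List (String × String × String)) (max_repetitions : Int) (out : Bool × Int) : Prop := out = check_loop_detection_alt state_history max_repetitions
instance (state_history : List (String × String × String)) (max_repetitions : Int) (out : Bool × Int) : Decidable (Spec_check_loop_detection state_history max_repetitions out) := by unfold Spec_check_loop_detection; infer_instance

-- ===== CLAIM (what is proved, stated in full; the proofs are below) =====
def Claim_equal_check_loop_detection : Prop := ∀ (state_history : List (String × String × String)) (max_repetitions : Int), Dom_check_loop_detection state_history max_repetitions → Pre_check_loop_detection state_history max_repetitions → Spec_check_loop_detection state_history max_repetitions (check_loop_detection state_history max_repetitions)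

-- ===== LEMMAS AND PROOFS =====
-- The reset-on-mismatch fold over ys.reverse equals the count-until-break over ys.
theorem clCountA_eq_foldl (latest : String × String × String)
    (ys : List (String × String × String)) :
    clCountA latest ys =
      ys.reverse.foldl
        (fun run x =>
          if x.1 == latest.1 && x.2.1 == latest.2.1 && x.2.2 == latest.2.2 then run + 1 else 0) 0 := by
  induction ys with
  | nil => rfl
  | cons y ys ih =>
    simp only [clCountA, List.reverse_cons, List.foldl_append, List.foldl_cons, List.foldl_nil, ih]
    split_ifs <;> omega

theorem check_loop_detection_spec : Claim_equal_check_loop_detection := by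
  intro sh mr _ hpre
  unfold Spec_check_loop_detection check_loop_detection check_loop_detection_alt
  split
  · rfl
  · rename_i hge
    have hne : sh ≠ [] := by
      intro he
      subst he
      exact hge (by simpa using hpre rfl)
    cases h : PySem.List.pyGet? sh (-1) with
    | none =>
      exfalso
      apply hne
      cases sh with
      | nil => rfl
      | cons a tl => simp [PySem.List.pyGet?, PySem.List.pyIdx?] at h
    | some latest =>
      simp only
      have := clCountA_eq_foldl latest sh.reverse
      rw [List.reverse_reverse] at this
      rw [this]
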